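-- pv_equiv track=rewrite | github.com/HYL-Dave/ArkScope | data_sources/sa_alpha_picks_client.py | _extract_sector
-- ===== SOURCE A (Python) =====
-- from typing import Any, Dict, List, Optional
--
-- def _extract_sector(texts: List[str]) -> Optional[str]:
--     """Extract sector from cell texts."""
--     sectors = {
--         "Technology", "Healthcare", "Financial", "Consumer", "Energy",
--         "Industrial", "Communication", "Materials", "Utilities", "Real Estate",
--     }
--     for t in texts:
--         for s in sectors:
--             if s.lower() in t.lower():
--                 return t.strip()
--     return None
-- ===== SOURCE B (Python) =====
-- from typing import List, Optional
--
-- # Keywords indexed by their first (lowercase) letter: each text is scanned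
-- # position by position and only the bucket for the current character is tried.
-- _INDEX = {
--     "t": ("technology",),
--     "h": ("healthcare",),
--     "f": ("financial",),
--     "c": ("consumer", "communication"),
--     "e": ("energy",),
--     "i": ("industrial",),
--     "m": ("materials",),
--     "u": ("utilities",),
--     "r": ("real estate",),
-- }
--
-- def _extract_sector(texts: List[str]) -> Optional[str]:
--     for t in texts:
--         low = t.lower()
--         for i in range(len(low)):
--             for k in _INDEX.get(low[i], ()):
--                 if low.startswith(k, i):
--                     return t.strip()
--     return None
-- ===== Notes on version B (the rewrite author's own statement) =====
-- stated objective: alternative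
-- what changed: Replaces A's keyword-major scan (for each text, test each of the 10 sector names with a substring search) by a position-major scan: a dict indexes the lowercased keywords by first letter, and each text is scanned once left to right, trying only the bucket of the current character with startswith.
import Mathlib
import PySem

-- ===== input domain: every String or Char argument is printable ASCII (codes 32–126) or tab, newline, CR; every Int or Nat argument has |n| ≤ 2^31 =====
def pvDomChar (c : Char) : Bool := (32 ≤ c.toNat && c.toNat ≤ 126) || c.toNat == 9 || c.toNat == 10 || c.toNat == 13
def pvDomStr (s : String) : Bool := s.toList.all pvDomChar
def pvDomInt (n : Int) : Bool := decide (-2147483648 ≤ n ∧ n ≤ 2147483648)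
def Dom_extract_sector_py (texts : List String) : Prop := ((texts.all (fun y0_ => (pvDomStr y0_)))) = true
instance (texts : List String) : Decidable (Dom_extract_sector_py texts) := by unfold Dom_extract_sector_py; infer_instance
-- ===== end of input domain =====

-- B replaces A's keyword-major substring scans by a position-major scan with a
-- first-letter bucket index (objective: alternative data structure/traversal).

-- ===== PORT A =====
-- Python set literal of the 10 sector names; the loop's outcome does not depend
-- on iteration order, ported in source order.
def pvSectorsA : List String :=
  ["Technology", "Healthcare", "Financial", "Consumer", "Energy",
   "Industrial", "Communication", "Materials", "Utilities", "Real Estate"]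

-- for t in texts: for s in sectors: if s.lower() in t.lower(): return t.strip()
def extract_sector_py : List String → Option String
  | [] => none
  | t :: rest =>
    if pvSectorsA.any (fun s => PySem.Str.isIn (PySem.Str.lower s) (PySem.Str.lower t)) then
      some (PySem.Str.strip t)
    else
      extract_sector_py rest

-- ===== PORT B =====
-- the _INDEX dict of Source B: keyword bucket for a given first letter
def pvBucket (c : Char) : List (List Char) :=
  if c = 't' then ["technology".toList]
  else if c = 'h' then ["healthcare".toList]
  else if c = 'f' then ["financial".toList]
  else if c = 'c' then ["consumer".toList, "communication".toList]
  else if c = 'e' then ["energy".toList]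
  else if c = 'i' then ["industrial".toList]
  else if c = 'm' then ["materials".toList]
  else if c = 'u' then ["utilities".toList]
  else if c = 'r' then ["real estate".toList]
  else []

-- for i in range(len(low)): for k in _INDEX.get(low[i], ()): if low.startswith(k, i): …
-- (low.startswith(k, i) is 'k is a prefix of low from position i', i.e. of the suffix)
def pvScanB : List Char → Bool
  | [] => false
  | c :: rest =>
    if (pvBucket c).any (fun k => PySem.Chars.startswith (c :: rest) k) then true
    else pvScanB rest

def extract_sector_py_alt : List String → Option String
  | [] => none
  | t :: rest =>
    if pvScanB (PySem.Chars.lower t.toList) then some (PySem.Str.strip t)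
    else extract_sector_py_alt rest

-- ===== PRECONDITION & SPEC =====
def Spec_extract_sector_py (texts : List String) (out : Option String) : Prop := out = extract_sector_py_alt texts
instance (texts : List String) (out : Option String) : Decidable (Spec_extract_sector_py texts out) := by unfold Spec_extract_sector_py; infer_instance

-- ===== CLAIM (what is proved, stated in full; the proofs are below) =====
def Claim_equal_extract_sector_py : Prop := ∀ (texts : List String), Dom_extract_sector_py texts → Spec_extract_sector_py texts (extract_sector_py texts)

-- ===== LEMMAS AND PROOFS =====

-- the lowercased keywords, in A's source order
def pvK : List (List Char) :=
  ["technology".toList, "healthcare".toList, "financial".toList, "consumer".toList,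
   "energy".toList, "industrial".toList, "communication".toList, "materials".toList,
   "utilities".toList, "real estate".toList]

theorem pv_mem_bucket (c : Char) (k : List Char) :
    k ∈ pvBucket c ↔ k ∈ pvK ∧ k.head? = some c := by
  constructor
  · intro h
    unfold pvBucket at h
    split_ifs at h with h1 h2 h3 h4 h5 h6 h7 h8 h9 <;>
      simp only [List.mem_cons, List.not_mem_nil, or_false] at h <;>
      first
        | exact h.elim
        | (rcases h with rfl | rfl <;> simp_all [pvK])
  · rintro ⟨hk, hh⟩
    simp only [pvK, List.mem_cons, List.not_mem_nil, or_false] at hk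
    rcases hk with rfl|rfl|rfl|rfl|rfl|rfl|rfl|rfl|rfl|rfl <;>
      (obtain rfl := Option.some.inj hh; decide)

theorem pv_scanB_iff (low : List Char) :
    pvScanB low = true ↔ ∃ k ∈ pvK, k <:+: low := by
  induction low with
  | nil => simp [pvScanB, pvK]
  | cons c rest ih =>
    constructor
    · intro h
      rw [pvScanB] at h
      split_ifs at h with hb
      · obtain ⟨k, hk, hp⟩ := List.any_eq_true.mp hb
        exact ⟨k, ((pv_mem_bucket c k).mp hk).1,
          List.IsPrefix.isInfix ((PySem.Chars.startswith_iff _ _).mp hp)⟩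
      · obtain ⟨k, hk, hs⟩ := ih.mp h
        exact ⟨k, hk, List.infix_cons hs⟩
    · rintro ⟨k, hk, hinf⟩
      rw [pvScanB]
      rcases List.infix_cons_iff.mp hinf with hp | hs
      · have hne : k ≠ [] := by
          simp only [pvK, List.mem_cons, List.not_mem_nil, or_false] at hk
          rcases hk with rfl|rfl|rfl|rfl|rfl|rfl|rfl|rfl|rfl|rfl <;> simp
        obtain ⟨a, k', rfl⟩ : ∃ a k', k = a :: k' := by
          cases k with
          | nil => exact absurd rfl hne
          | cons a k' => exact ⟨a, k', rfl⟩
        obtain ⟨rfl, -⟩ := List.cons_prefix_cons.mp hp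
        have hb : ((pvBucket a).any fun k => PySem.Chars.startswith (a :: rest) k) = true :=
          List.any_eq_true.mpr ⟨a :: k', (pv_mem_bucket a (a :: k')).mpr ⟨hk, rfl⟩,
            (PySem.Chars.startswith_iff _ _).mpr hp⟩
        simp [hb]
      · have hb2 := ih.mpr ⟨k, hk, hs⟩
        split_ifs <;> simp [hb2]

theorem pvK_eq_map : pvK = pvSectorsA.map (fun s => PySem.Chars.lower s.toList) := by decide

theorem pv_any_eq (t : String) :
    pvSectorsA.any (fun s => PySem.Str.isIn (PySem.Str.lower s) (PySem.Str.lower t)) =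
      pvScanB (PySem.Chars.lower t.toList) := by
  rw [Bool.eq_iff_iff, pv_scanB_iff, pvK_eq_map]
  simp [List.any_eq_true, List.mem_map, PySem.Chars.isIn_iff_infix]

theorem pv_ports_eq (texts : List String) :
    extract_sector_py texts = extract_sector_py_alt texts := by
  induction texts with
  | nil => rfl
  | cons t rest ih =>
    simp only [extract_sector_py, extract_sector_py_alt, pv_any_eq t, ih]

-- ===== VERDICT (by name: the statement is the Claim_ definition above) =====
theorem extract_sector_py_spec : Claim_equal_extract_sector_py := by
  intro texts _
  exact pv_ports_eq texts
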